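-- pv_equiv track=rewrite | github.com/Ronaldmtt/Banco_Imagem_OAZ | app.py | normalize_to_taxonomy
-- ===== SOURCE A (Python) =====
-- def normalize_to_taxonomy(value, valid_values):
--     """Normaliza um valor para corresponder à taxonomia da Carteira"""
--     if not value or not valid_values:
--         return value
--
--     value_upper = value.upper().strip()
--
--     for valid in valid_values:
--         if valid.upper() == value_upper:
--             return valid
--
--     for valid in valid_values:
--         if value_upper in valid.upper() or valid.upper() in value_upper:
--             return valid
--
--     return value.upper()
-- ===== SOURCE B (Python) =====
-- def normalize_to_taxonomy(value, valid_values):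
--     """Normaliza um valor para corresponder à taxonomia da Carteira"""
--     if not value or not valid_values:
--         return value
--
--     value_upper = value.upper().strip()
--
--     candidate = None
--     for valid in valid_values:
--         valid_upper = valid.upper()
--         if valid_upper == value_upper:
--             return valid
--         if candidate is None and (value_upper in valid_upper or valid_upper in value_upper):
--             candidate = valid
--
--     return candidate if candidate is not None else value.upper()
-- ===== Notes on version B (the rewrite author's own statement) =====
-- stated objective: alternative
-- what changed: Replaces A's two sequential scans over valid_values with a single loop that returns immediately on an exact (case-insensitive) match and otherwise remembers the first substring-match candidate, returned after the loop.
import Mathlib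
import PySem

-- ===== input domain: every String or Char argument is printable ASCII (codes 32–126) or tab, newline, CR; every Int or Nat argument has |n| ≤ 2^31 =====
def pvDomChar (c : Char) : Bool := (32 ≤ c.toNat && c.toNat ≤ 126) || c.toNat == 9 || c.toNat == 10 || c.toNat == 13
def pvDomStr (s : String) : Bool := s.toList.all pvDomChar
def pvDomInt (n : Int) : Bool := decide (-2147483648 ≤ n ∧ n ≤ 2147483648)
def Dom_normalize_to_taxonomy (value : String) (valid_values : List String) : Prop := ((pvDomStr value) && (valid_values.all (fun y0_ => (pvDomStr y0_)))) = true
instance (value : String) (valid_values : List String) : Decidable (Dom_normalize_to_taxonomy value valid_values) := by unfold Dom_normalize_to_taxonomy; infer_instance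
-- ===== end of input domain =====

-- B replaces A's two sequential scans with one loop that returns on an exact match and
-- otherwise remembers the first substring-match candidate (alternative decomposition).

-- ===== PORT A =====
-- first loop of A: first valid with valid.upper() == value_upper
def pvFindExact (vu : String) : List String → Option String
  | [] => none
  | v :: rest => if PySem.Str.upper v == vu then some v else pvFindExact vu rest

-- second loop of A: first valid with value_upper in valid.upper() or valid.upper() in value_upper
def pvFindSub (vu : String) : List String → Option String
  | [] => none
  | v :: rest =>
      if PySem.Str.isIn vu (PySem.Str.upper v) || PySem.Str.isIn (PySem.Str.upper v) vu
      then some v else pvFindSub vu rest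

def normalize_to_taxonomy (value : String) (valid_values : List String) : String :=
  if value.toList.isEmpty || valid_values.isEmpty then value
  else
    let value_upper := PySem.Str.strip (PySem.Str.upper value)
    match pvFindExact value_upper valid_values with
    | some v => v
    | none =>
        match pvFindSub value_upper valid_values with
        | some v => v
        | none => PySem.Str.upper value

-- ===== PORT B =====
-- B's single loop: `cand` is the candidate variable, `fb` the after-loop fallback value.upper()
def pvScanB (vu fb : String) (cand : Option String) : List String → String
  | [] => cand.getD fb
  | v :: rest =>
      let vup := PySem.Str.upper v
      if vup == vu then v
      else
        pvScanB vu fb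
          (if cand.isNone && (PySem.Str.isIn vu vup || PySem.Str.isIn vup vu) then some v else cand)
          rest

def normalize_to_taxonomy_alt (value : String) (valid_values : List String) : String :=
  if value.toList.isEmpty || valid_values.isEmpty then value
  else
    pvScanB (PySem.Str.strip (PySem.Str.upper value)) (PySem.Str.upper value) none valid_values

-- ===== PRECONDITION & SPEC =====
def Spec_normalize_to_taxonomy (value : String) (valid_values : List String) (out : String) : Prop := out = normalize_to_taxonomy_alt value valid_values
instance (value : String) (valid_values : List String) (out : String) : Decidable (Spec_normalize_to_taxonomy value valid_values out) := by unfold Spec_normalize_to_taxonomy; infer_instance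

-- ===== CLAIM (what is proved, stated in full; the proofs are below) =====
def Claim_equal_normalize_to_taxonomy : Prop := ∀ (value : String) (valid_values : List String), Dom_normalize_to_taxonomy value valid_values → Spec_normalize_to_taxonomy value valid_values (normalize_to_taxonomy value valid_values)

-- ===== LEMMAS AND PROOFS =====

-- B's loop computes: the first exact match if any, else the saved candidate, else the
-- first substring match, else the fallback.
theorem pvScanB_eq (vu fb : String) (l : List String) :
    ∀ cand : Option String,
      pvScanB vu fb cand l =
        match pvFindExact vu l with
        | some v => v
        | none =>
            match cand with
            | some c => c
            | none => (pvFindSub vu l).getD fb := by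
  induction l with
  | nil => intro cand; cases cand <;> simp [pvScanB, pvFindExact, pvFindSub]
  | cons v rest ih =>
      intro cand
      simp only [pvScanB, pvFindExact, pvFindSub]
      by_cases hx : (PySem.Str.upper v == vu) = true
      · rw [if_pos hx, if_pos hx]
      · rw [if_neg hx, if_neg hx, ih]
        cases hE : pvFindExact vu rest with
        | some w => simp
        | none =>
            cases cand with
            | some c => simp
            | none =>
                simp only [Option.isNone_none, Bool.true_and]
                split_ifs with hc <;> simp

-- ===== VERDICT (by name: the statement is the Claim_ definition above) =====
theorem normalize_to_taxonomy_spec : Claim_equal_normalize_to_taxonomy := by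
  intro value valid_values _
  unfold Spec_normalize_to_taxonomy normalize_to_taxonomy normalize_to_taxonomy_alt
  by_cases h : value.toList.isEmpty || valid_values.isEmpty
  · simp [h]
  · simp only [h, if_false, Bool.false_eq_true]
    rw [pvScanB_eq]
    cases hx : pvFindExact (PySem.Str.strip (PySem.Str.upper value)) valid_values with
    | some v => simp
    | none =>
        cases hs : pvFindSub (PySem.Str.strip (PySem.Str.upper value)) valid_values <;> simp
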